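-- pv_equiv track=rewrite | github.com/bt1g18/comp3200 | cluster_eval.py | greedy_relabel
-- ===== SOURCE A (Python) =====
-- import operator
-- from collections import defaultdict
--
-- def greedy_relabel(y_pred, y_test):
--     # cluster -> counts of each true labels
--     counters = defaultdict(lambda: defaultdict(lambda: 0))
--
--     for cluster, true in zip(y_pred, y_test):
--         counters[cluster][true] += 1
--
--     relabels = {}
--     for cluster, counts in counters.items():
--         best = max(counts.items(), key=operator.itemgetter(1))[0]
--         relabels[cluster] = best
--
--     l = sorted(list(relabels.items()), key=lambda a: a[0])
--     return [b for a, b in l]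
-- ===== SOURCE B (Python) =====
-- def greedy_relabel(y_pred, y_test):
--     # Sort the (cluster, label) pairs by cluster (stable), then scan each
--     # consecutive run once, picking the first label that reaches the maximum count.
--     pairs = sorted(zip(y_pred, y_test), key=lambda p: p[0])
--     out = []
--     i = 0
--     n = len(pairs)
--     while i < n:
--         cluster = pairs[i][0]
--         counts = {}
--         while i < n and pairs[i][0] == cluster:
--             t = pairs[i][1]
--             counts[t] = counts.get(t, 0) + 1
--             i += 1
--         out.append(max(counts, key=counts.get))
--     return out
-- ===== Notes on version B (the rewrite author's own statement) =====
-- stated objective: alternative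
-- what changed: Replaces A's nested defaultdict-of-counters plus a second pass over the dict and a final sort of the relabel items by a single stable sort of the (cluster,label) pairs followed by one linear scan over consecutive runs, counting each run and emitting its first-max label directly in ascending cluster order.
import Mathlib
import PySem

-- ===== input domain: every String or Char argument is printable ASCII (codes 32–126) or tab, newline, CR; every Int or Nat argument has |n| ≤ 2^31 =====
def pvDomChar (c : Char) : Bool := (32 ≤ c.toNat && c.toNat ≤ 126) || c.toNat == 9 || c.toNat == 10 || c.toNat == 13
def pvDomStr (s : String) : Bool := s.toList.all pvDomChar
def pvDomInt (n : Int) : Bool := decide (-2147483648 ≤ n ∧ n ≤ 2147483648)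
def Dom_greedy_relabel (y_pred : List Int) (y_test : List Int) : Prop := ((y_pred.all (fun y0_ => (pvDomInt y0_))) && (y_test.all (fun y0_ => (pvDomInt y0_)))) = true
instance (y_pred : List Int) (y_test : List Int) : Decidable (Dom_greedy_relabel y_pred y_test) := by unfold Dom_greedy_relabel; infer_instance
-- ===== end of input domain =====

-- B replaces the nested counter dicts + item sort by one stable sort of the pairs and a single
-- run-scan in cluster order (objective: alternative; same results, no speed claim).

-- ===== PORT A =====
def greedy_relabel (y_pred : List Int) (y_test : List Int) : List Int :=
  -- counters = defaultdict(lambda: defaultdict(lambda: 0)); counters[cluster][true] += 1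
  let counters : PySem.Dict Int (PySem.Dict Int Int) :=
    (y_pred.zip y_test).foldl
      (fun d p => d.modify p.1 PySem.Dict.empty (fun inner => inner.modify p.2 0 (· + 1)))
      PySem.Dict.empty
  -- relabels[cluster] = max(counts.items(), key=itemgetter(1))[0]
  let relabels : PySem.Dict Int Int :=
    counters.items.foldl
      (fun r p =>
        match PySem.List.max? p.2.items (fun q => q.2) with
        | some best => r.insert p.1 best.1
        | none => r)  -- Python's max would raise on an empty counter; unreachable here
      PySem.Dict.empty
  let l := PySem.List.sorted relabels.items (fun a => a.1) false
  l.map (fun b => b.2)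

-- ===== PORT B =====
-- the nested while loops of Source B: outer = one step per consecutive run of equal clusters,
-- inner = scan that run (takeWhile/dropWhile split of the sorted pair list)
def pvRuns : List (Int × Int) → List (Int × List Int)
  | [] => []
  | p :: rest =>
      (p.1, p.2 :: (rest.takeWhile (fun q => q.1 == p.1)).map (fun q => q.2)) ::
      pvRuns (rest.dropWhile (fun q => q.1 == p.1))
termination_by l => l.length
decreasing_by
  simp only [List.length_cons]
  exact Nat.lt_succ_of_le (List.length_dropWhile_le _ _)

-- counts[t] = counts.get(t, 0) + 1;  max(counts, key=counts.get)
def pvMajority (labels : List Int) : Int :=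
  let counts : PySem.Dict Int Int :=
    labels.foldl (fun d t => d.insert t (d.getD t 0 + 1)) PySem.Dict.empty
  match PySem.List.max? counts.keys (fun k => counts.getD k 0) with
  | some k => k
  | none => 0  -- Python's max would raise on an empty dict; unreachable (runs are nonempty)

def greedy_relabel_alt (y_pred : List Int) (y_test : List Int) : List Int :=
  let pairs := PySem.List.sorted (y_pred.zip y_test) (fun p => p.1) false
  (pvRuns pairs).map (fun g => pvMajority g.2)

-- ===== PRECONDITION & SPEC =====
def Spec_greedy_relabel (y_pred : List Int) (y_test : List Int) (out : List Int) : Prop := out = greedy_relabel_alt y_pred y_test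
instance (y_pred : List Int) (y_test : List Int) (out : List Int) : Decidable (Spec_greedy_relabel y_pred y_test out) := by unfold Spec_greedy_relabel; infer_instance

-- ===== CLAIM (what is proved, stated in full; the proofs are below) =====
def Claim_equal_greedy_relabel : Prop := ∀ (y_pred : List Int) (y_test : List Int), Dom_greedy_relabel y_pred y_test → Spec_greedy_relabel y_pred y_test (greedy_relabel y_pred y_test)

-- ===== LEMMAS AND PROOFS =====

-- labels of the pairs in cluster c, in encounter order
def pvLabels (L : List (Int × Int)) (c : Int) : List Int :=
  (L.filter (fun q => q.1 == c)).map (fun q => q.2)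

-- the first key of maximal count in a counter dict (A's inner max, made total)
def pvBestA (cnt : PySem.Dict Int Int) : Int :=
  match PySem.List.max? cnt.items (fun q => q.2) with
  | some b => b.1
  | none => 0

-- ---- A-side ----
theorem pvA1 (L : List (Int × Int)) (d : PySem.Dict Int (PySem.Dict Int Int)) (c : Int) :
    (L.foldl (fun d p => d.modify p.1 PySem.Dict.empty (fun inner => inner.modify p.2 0 (· + 1))) d).getD c PySem.Dict.empty
    = (pvLabels L c).foldl (fun inner t => inner.modify t 0 (· + 1)) (d.getD c PySem.Dict.empty) := by
  induction L generalizing d with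
  | nil => simp [pvLabels]
  | cons p L ih =>
    simp only [List.foldl_cons]
    rw [ih]
    by_cases hc : p.1 = c
    · simp [pvLabels, hc]
    · simp [pvLabels, hc, PySem.Dict.getD_modify, Ne.symm hc]

theorem pvA_items (L : List (Int × Int)) :
    (L.foldl (fun d p => d.modify p.1 PySem.Dict.empty (fun inner => inner.modify p.2 (0:Int) (· + 1))) PySem.Dict.empty).items
    = (PySem.Set.ofList (L.map (fun p => p.1))).map (fun c => (c, PySem.Dict.counter (pvLabels L c))) := by
  have hk : (L.foldl (fun d p => d.modify p.1 PySem.Dict.empty (fun inner => inner.modify p.2 (0:Int) (· + 1))) PySem.Dict.empty).keys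
      = PySem.Set.ofList (L.map (fun p => p.1)) := by
    have := PySem.Dict.keys_foldl_modify_key (l := L) (key := fun p => p.1)
      (d0 := (PySem.Dict.empty : PySem.Dict Int Int)) (f := fun _ p inner => inner.modify p.2 (0:Int) (· + 1)) (d := (PySem.Dict.empty : PySem.Dict Int (PySem.Dict Int Int)))
    simpa [PySem.Set.update, PySem.Set.ofList] using this
  have hnd : (L.foldl (fun d p => d.modify p.1 PySem.Dict.empty (fun inner => inner.modify p.2 (0:Int) (· + 1))) PySem.Dict.empty).keys.Nodup := by
    exact PySem.Dict.nodup_keys_foldl_modify_key (l := L) (key := fun p => p.1)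
      (d0 := (PySem.Dict.empty : PySem.Dict Int Int)) (f := fun _ p inner => inner.modify p.2 (0:Int) (· + 1)) (d := (PySem.Dict.empty : PySem.Dict Int (PySem.Dict Int Int))) (by simp)
  have hi := PySem.Dict.items_eq_map_keys _ hnd PySem.Dict.empty
  rw [hk] at hi
  refine hi.trans ?_
  apply List.map_congr_left
  intro c _
  rw [pvA1]
  simp [PySem.Dict.counter_eq_foldl]

theorem pvLabels_ne_nil (L : List (Int × Int)) (c : Int) (hc : c ∈ L.map (fun p => p.1)) :
    pvLabels L c ≠ [] := by
  simp only [pvLabels, List.mem_map] at hc ⊢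
  obtain ⟨p, hp, rfl⟩ := hc
  intro h
  have hm : p ∈ L.filter (fun q => q.1 == p.1) := by simp [List.mem_filter, hp]
  rw [List.map_eq_nil_iff] at h
  rw [h] at hm
  exact (List.not_mem_nil) hm

theorem pv_insertBy_map {α : Type} (g : Int → α) (c : Int) (l : List Int) :
    PySem.List.insertBy (fun a b => decide (a.1 < b.1)) (c, g c) (l.map (fun c => (c, g c)))
    = (PySem.List.insertBy (fun a b => decide (a < b)) c l).map (fun c => (c, g c)) := by
  induction l with
  | nil => simp [PySem.List.insertBy]
  | cons y ys ih =>
    simp only [List.map_cons, PySem.List.insertBy]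
    by_cases h : c < y
    · simp [h]
    · simp [h, ih]

theorem pv_sorted_map_pair {α : Type} (ks : List Int) (g : Int → α) :
    PySem.List.sorted (ks.map (fun c => (c, g c))) (fun p => p.1) false
    = (PySem.List.sorted ks (fun c => c) false).map (fun c => (c, g c)) := by
  rw [PySem.List.sorted_eq_foldl_insertBy, PySem.List.sorted_eq_foldl_insertBy, List.foldl_map]
  suffices h : ∀ acc : List Int,
      ks.foldl (fun acc c => PySem.List.insertBy (fun a b => decide (a.1 < b.1)) (c, g c) acc) (acc.map (fun c => (c, g c)))
      = (ks.foldl (fun acc c => PySem.List.insertBy (fun a b => decide (a < b)) c acc) acc).map (fun c => (c, g c)) by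
    simpa using h []
  induction ks with
  | nil => simp
  | cons k ks ih =>
    intro acc
    simp only [List.foldl_cons]
    rw [pv_insertBy_map, ih]

theorem pv_max?_map {α β κ : Type} [LT κ] [DecidableLT κ] (l : List α) (f : α → β) (key : β → κ) :
    PySem.List.max? (l.map f) key = (PySem.List.max? l (fun a => key (f a))).map f := by
  unfold PySem.List.max?
  rw [List.foldl_map]
  suffices h : ∀ acc : Option α,
      l.foldl (fun acc x => match acc with | none => some (f x) | some m => if key m < key (f x) then some (f x) else some m) (acc.map f)
      = (l.foldl (fun acc x => match acc with | none => some x | some m => if key (f m) < key (f x) then some x else some m) acc).map f by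
    simpa using h none
  induction l with
  | nil => simp
  | cons x xs ih =>
    intro acc
    simp only [List.foldl_cons]
    cases acc with
    | none => simpa using ih (some x)
    | some m =>
      simp only [Option.map_some]
      by_cases h : key (f m) < key (f x)
      · simpa [h] using ih (some x)
      · simpa [h] using ih (some m)

theorem pvA_char (y_pred y_test : List Int) :
    greedy_relabel y_pred y_test
    = (PySem.List.sorted (PySem.Set.ofList ((y_pred.zip y_test).map (fun p => p.1))) (fun c => c) false).map
        (fun c => pvBestA (PySem.Dict.counter (pvLabels (y_pred.zip y_test) c))) := by
  unfold greedy_relabel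
  dsimp only
  rw [pvA_items]
  rw [List.foldl_map]
  set L := y_pred.zip y_test with hL
  set ks := PySem.Set.ofList (L.map (fun p => p.1)) with hks
  have hcongr : ks.foldl
      (fun r c =>
        match PySem.List.max? (PySem.Dict.counter (pvLabels L c)).items (fun q => q.2) with
        | some best => r.insert c best.1
        | none => r) PySem.Dict.empty
      = ks.foldl (fun r c => r.insert c (pvBestA (PySem.Dict.counter (pvLabels L c)))) PySem.Dict.empty := by
    apply PySem.List.foldl_congr_mem
    intro r c hc
    have hne : pvLabels L c ≠ [] :=
      pvLabels_ne_nil L c ((PySem.Set.mem_ofList _ _).mp hc)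
    have hit : (PySem.Dict.counter (pvLabels L c)).items ≠ [] := by
      rw [PySem.Dict.items_counter]
      simp only [ne_eq, List.map_eq_nil_iff]
      intro h0
      obtain ⟨x, hx⟩ := List.exists_mem_of_ne_nil _ hne
      have hx' := (PySem.Set.mem_ofList (pvLabels L c) x).mpr hx
      rw [h0] at hx'
      exact List.not_mem_nil hx'
    obtain ⟨b, hb⟩ : ∃ b, PySem.List.max? (PySem.Dict.counter (pvLabels L c)).items (fun q => q.2) = some b := by
      cases hmx : PySem.List.max? (PySem.Dict.counter (pvLabels L c)).items (fun q => q.2) with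
      | none => exact absurd ((PySem.List.max?_eq_none_iff _ _).mp hmx) hit
      | some b => exact ⟨b, rfl⟩
    rw [hb]
    unfold pvBestA
    rw [hb]
  rw [hcongr]
  have hfresh := PySem.Dict.items_foldl_insert_fresh (l := ks) (k := fun c => c)
      (v := fun c => pvBestA (PySem.Dict.counter (pvLabels L c)))
      (d := (PySem.Dict.empty : PySem.Dict Int Int))
      (by intro a _; simp) (by simp only [List.map_id']; exact PySem.Set.nodup_ofList _)
  rw [hfresh]
  simp only [show (PySem.Dict.empty : PySem.Dict Int Int).items = [] from rfl, List.nil_append]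
  rw [pv_sorted_map_pair]
  simp [List.map_map, Function.comp]

-- ---- B-side ----
theorem pv_pw_insertBy (x : Int × Int) (l : List (Int × Int))
    (h : l.Pairwise (fun a b => a.1 ≤ b.1)) :
    (PySem.List.insertBy (fun a b => decide (a.1 < b.1)) x l).Pairwise (fun a b => a.1 ≤ b.1) := by
  induction l with
  | nil => simp [PySem.List.insertBy]
  | cons y ys ih =>
    rw [List.pairwise_cons] at h
    simp only [PySem.List.insertBy]
    by_cases hxy : x.1 < y.1
    · simp only [hxy, decide_true, if_true]
      refine List.pairwise_cons.mpr ⟨?_, List.pairwise_cons.mpr h⟩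
      intro b hb
      rcases List.mem_cons.mp hb with rfl | hb
      · exact le_of_lt hxy
      · exact le_trans (le_of_lt hxy) (h.1 b hb)
    · simp only [hxy, decide_false, Bool.false_eq_true, if_false]
      refine List.pairwise_cons.mpr ⟨?_, ih h.2⟩
      intro b hb
      rcases (PySem.List.mem_insertBy _ x b ys).mp hb with rfl | hb
      · exact le_of_not_gt hxy
      · exact h.1 b hb

theorem pv_filter_insertBy_neg (c : Int) (x : Int × Int) (before : Int × Int → Int × Int → Bool)
    (l : List (Int × Int)) (hx : x.1 ≠ c) :
    (PySem.List.insertBy before x l).filter (fun q => q.1 == c) = l.filter (fun q => q.1 == c) := by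
  induction l with
  | nil => simp [PySem.List.insertBy, hx]
  | cons y ys ih =>
    simp only [PySem.List.insertBy]
    by_cases h : before x y
    · simp [h, List.filter_cons, hx]
    · simp [h, List.filter_cons, ih]

theorem pv_filter_insertBy_pos (c : Int) (x : Int × Int) (l : List (Int × Int))
    (hx : x.1 = c) (h : l.Pairwise (fun a b => a.1 ≤ b.1)) :
    (PySem.List.insertBy (fun a b => decide (a.1 < b.1)) x l).filter (fun q => q.1 == c)
    = l.filter (fun q => q.1 == c) ++ [x] := by
  induction l with
  | nil => simp [PySem.List.insertBy, hx]
  | cons y ys ih =>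
    rw [List.pairwise_cons] at h
    simp only [PySem.List.insertBy]
    by_cases hxy : x.1 < y.1
    · simp only [hxy, decide_true, if_true]
      have hy : y.1 ≠ c := by omega
      have hys : (y :: ys).filter (fun q => q.1 == c) = [] := by
        rw [List.filter_eq_nil_iff]
        intro q hq
        rcases List.mem_cons.mp hq with rfl | hq
        · simp [hy]
        · have : y.1 ≤ q.1 := h.1 q hq
          have : q.1 ≠ c := by omega
          simp [this]
      rw [List.filter_cons]
      simp only [hx, beq_self_eq_true, if_true]
      rw [hys]
      rfl
    · simp only [hxy, decide_false, Bool.false_eq_true, if_false, List.filter_cons]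
      by_cases hyc : y.1 == c
      · simp only [hyc, if_true]
        rw [ih h.2]
        rfl
      · simp only [hyc, Bool.false_eq_true, if_false]
        exact ih h.2

theorem pv_filter_sorted (L : List (Int × Int)) (c : Int) :
    (PySem.List.sorted L (fun p => p.1) false).filter (fun q => q.1 == c)
    = L.filter (fun q => q.1 == c) := by
  rw [PySem.List.sorted_eq_foldl_insertBy]
  suffices h : ∀ acc : List (Int × Int), acc.Pairwise (fun a b => a.1 ≤ b.1) →
      (L.foldl (fun acc x => PySem.List.insertBy (fun a b => decide (a.1 < b.1)) x acc) acc).filter (fun q => q.1 == c)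
      = acc.filter (fun q => q.1 == c) ++ L.filter (fun q => q.1 == c) by
    simpa using h [] (by simp)
  induction L with
  | nil => intro acc _; simp
  | cons p L ih =>
    intro acc hacc
    simp only [List.foldl_cons]
    rw [ih _ (pv_pw_insertBy p acc hacc)]
    by_cases hp : p.1 = c
    · rw [pv_filter_insertBy_pos c p acc hp hacc]
      simp [hp, List.append_assoc]
    · rw [pv_filter_insertBy_neg c p _ acc hp]
      simp [hp]

theorem pv_gt_dropWhile (c : Int) (l : List (Int × Int))
    (hl : l.Pairwise (fun a b => a.1 ≤ b.1)) (hall : ∀ q ∈ l, c ≤ q.1) :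
    ∀ q ∈ l.dropWhile (fun q => q.1 == c), c < q.1 := by
  induction l with
  | nil => simp
  | cons y ys ih =>
    rw [List.pairwise_cons] at hl
    by_cases hy : y.1 == c
    · simp only [List.dropWhile_cons, hy, if_true]
      exact ih hl.2 (fun q hq => hall q (List.mem_cons_of_mem _ hq))
    · simp only [List.dropWhile_cons, hy, Bool.false_eq_true, if_false]
      intro q hq
      have hyc : c < y.1 := by
        have := hall y (List.mem_cons_self)
        have : y.1 ≠ c := by simpa using hy
        omega
      rcases List.mem_cons.mp hq with rfl | hq
      · exact hyc
      · exact lt_of_lt_of_le hyc (hl.1 q hq)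

theorem pvRuns_spec (P : List (Int × Int)) (h : P.Pairwise (fun a b => a.1 ≤ b.1)) :
    pvRuns P = ((pvRuns P).map (fun g => g.1)).map (fun c => (c, pvLabels P c))
    ∧ ((pvRuns P).map (fun g => g.1)).Pairwise (· < ·)
    ∧ (∀ c, c ∈ (pvRuns P).map (fun g => g.1) ↔ c ∈ P.map (fun p => p.1)) := by
  induction P using pvRuns.induct with
  | case1 => simp [pvRuns]
  | case2 p rest ih =>
    rw [List.pairwise_cons] at h
    set run := rest.takeWhile (fun q => q.1 == p.1) with hrun
    set rest' := rest.dropWhile (fun q => q.1 == p.1) with hrest'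
    have hsplit : run ++ rest' = rest := List.takeWhile_append_dropWhile
    have hrunmem : ∀ q ∈ run, q.1 = p.1 := by
      intro q hq
      have := List.mem_takeWhile_imp hq
      simpa using this
    have hgt : ∀ q ∈ rest', p.1 < q.1 :=
      pv_gt_dropWhile p.1 rest h.2 h.1
    have hpw' : rest'.Pairwise (fun a b => a.1 ≤ b.1) :=
      List.Pairwise.sublist (List.dropWhile_sublist _) h.2
    obtain ⟨ihEq, ihPw, ihMem⟩ := ih hpw'
    have hstep : pvRuns (p :: rest)
        = (p.1, p.2 :: run.map (fun q => q.2)) :: pvRuns rest' := by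
      rw [pvRuns]
    refine ⟨?_, ?_, ?_⟩
    · -- equation
      rw [hstep]
      simp only [List.map_cons]
      congr 1
      · -- head group
        have hfil : (p :: rest).filter (fun q => q.1 == p.1) = p :: run := by
          rw [List.filter_cons_of_pos (by simp), ← hsplit, List.filter_append]
          have h1 : run.filter (fun q => q.1 == p.1) = run :=
            List.filter_eq_self.mpr (fun q hq => by simp [hrunmem q hq])
          have h2 : rest'.filter (fun q => q.1 == p.1) = [] :=
            List.filter_eq_nil_iff.mpr (fun q hq => by
              have := hgt q hq; simp; omega)
          rw [h1, h2, List.append_nil]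
        simp [pvLabels, hfil]
      · -- tail groups
        have hfun : ∀ c ∈ (pvRuns rest').map (fun g => g.1),
            (c, pvLabels (p :: rest) c) = (c, pvLabels rest' c) := by
          intro c hc
          have hcrest' : c ∈ rest'.map (fun p => p.1) := (ihMem c).mp hc
          have hcgt : p.1 < c := by
            obtain ⟨q, hq, rfl⟩ := List.mem_map.mp hcrest'
            exact hgt q hq
          have hfil : (p :: rest).filter (fun q => q.1 == c) = rest'.filter (fun q => q.1 == c) := by
            rw [List.filter_cons_of_neg (by simp; omega), ← hsplit, List.filter_append]
            have h1 : run.filter (fun q => q.1 == c) = [] :=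
              List.filter_eq_nil_iff.mpr (fun q hq => by
                have := hrunmem q hq; simp; omega)
            rw [h1, List.nil_append]
          simp only [pvLabels, hfil]
        rw [List.map_congr_left hfun]
        exact ihEq
    · -- pairwise <
      rw [hstep]
      simp only [List.map_cons]
      refine List.pairwise_cons.mpr ⟨?_, ihPw⟩
      intro c hc
      obtain ⟨q, hq, rfl⟩ := List.mem_map.mp ((ihMem c).mp hc)
      exact hgt q hq
    · -- membership
      intro c
      rw [hstep]
      simp only [List.map_cons, List.mem_cons, ihMem]
      constructor
      · rintro (rfl | hc)
        · exact Or.inl rfl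
        · obtain ⟨q, hq, rfl⟩ := List.mem_map.mp hc
          have : q ∈ rest := by
            rw [← hsplit]
            exact List.mem_append_right _ hq
          exact Or.inr (List.mem_map.mpr ⟨q, this, rfl⟩)
      · rintro (rfl | hc)
        · exact Or.inl rfl
        · obtain ⟨q, hq, rfl⟩ := List.mem_map.mp hc
          rw [← hsplit] at hq
          rcases List.mem_append.mp hq with hq | hq
          · exact Or.inl (hrunmem q hq)
          · exact Or.inr (List.mem_map.mpr ⟨q, hq, rfl⟩)

theorem pvB4 (ls : List Int) : pvMajority ls = pvBestA (PySem.Dict.counter ls) := by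
  unfold pvMajority pvBestA
  rw [PySem.Dict.foldl_insert_getD_add_one_eq_counter]
  dsimp only
  rw [PySem.Dict.items_counter, pv_max?_map, PySem.Dict.keys_counter]
  have hkey : (fun k : Int => (PySem.Dict.counter ls).getD k 0) = (fun k : Int => ((ls.count k : Nat) : Int)) := by
    funext k; exact PySem.Dict.getD_counter ls k
  rw [hkey]
  cases PySem.List.max? (PySem.Set.ofList ls) (fun k : Int => ((ls.count k : Nat) : Int)) with
  | none => simp
  | some k => simp

theorem pvB_char (y_pred y_test : List Int) :
    greedy_relabel_alt y_pred y_test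
    = (PySem.List.sorted (PySem.Set.ofList ((y_pred.zip y_test).map (fun p => p.1))) (fun c => c) false).map
        (fun c => pvBestA (PySem.Dict.counter (pvLabels (y_pred.zip y_test) c))) := by
  unfold greedy_relabel_alt
  dsimp only
  set L := y_pred.zip y_test with hL
  set P := PySem.List.sorted L (fun p => p.1) false with hP
  have hpw : P.Pairwise (fun a b => a.1 ≤ b.1) := PySem.List.sorted_pairwise L (fun p => p.1)
  obtain ⟨hEq, hPw, hMem⟩ := pvRuns_spec P hpw
  set C := (pvRuns P).map (fun g => g.1) with hC
  have hCsorted : PySem.List.sorted (PySem.Set.ofList (L.map (fun p => p.1))) (fun c => c) false = C := by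
    apply PySem.List.sorted_eq_of_perm_of_pairwise_lt
    · rw [List.perm_ext_iff_of_nodup (hPw.imp (fun h => ne_of_lt h)) (PySem.Set.nodup_ofList _)]
      intro c
      rw [PySem.Set.mem_ofList]
      rw [hMem c]
      exact (PySem.List.sorted_perm L (fun p => p.1) false).map (fun p => p.1) |>.mem_iff
    · exact hPw
  rw [hCsorted]
  conv_lhs => rw [hEq]
  rw [List.map_map]
  apply List.map_congr_left
  intro c hc
  simp only [Function.comp]
  rw [pvB4]
  have : pvLabels P c = pvLabels L c := by
    simp only [pvLabels, hP]
    rw [pv_filter_sorted]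
  rw [this]

-- ===== VERDICT (by name: the statement is the Claim_ definition above) =====
theorem greedy_relabel_spec : Claim_equal_greedy_relabel := by
  intro y_pred y_test _
  unfold Spec_greedy_relabel
  rw [pvA_char, pvB_char]
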